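-- pv_equiv track=rewrite | github.com/Javeed-me/Simple-Triage-Navigator | appoll.py | fallback_followup_question
-- ===== SOURCE A (Python) =====
-- def fallback_followup_question(symptoms: str) -> str:
--     s = symptoms.lower()
--     if any(k in s for k in ["chest", "pressure", "tightness", "crushing"]):
--         return "Is the chest pain severe, sudden, or radiating to the arm/jaw?"
--     if any(k in s for k in ["breath", "breathing", "shortness of breath", "cant breathe"]):
--         return "Are you finding it difficult to breathe even at rest?"
--     if "fever" in s:
--         return "How high is your fever and how long have you had it?"
--     return "On a scale from mild to severe, how would you rate your main symptom?"
-- ===== SOURCE B (Python) =====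
-- # One-pass scanner: walks the lowered string once and at each position checks
-- # which rule keyword starts there, keeping the highest-priority (minimum) rule index.
-- _RULES = [
--     ("chest", 0), ("pressure", 0), ("tightness", 0), ("crushing", 0),
--     ("breath", 1), ("breathing", 1), ("shortness of breath", 1), ("cant breathe", 1),
--     ("fever", 2),
-- ]
--
-- _QUESTIONS = [
--     "Is the chest pain severe, sudden, or radiating to the arm/jaw?",
--     "Are you finding it difficult to breathe even at rest?",
--     "How high is your fever and how long have you had it?",
--     "On a scale from mild to severe, how would you rate your main symptom?",
-- ]
--
-- def fallback_followup_question(symptoms: str) -> str: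
--     s = symptoms.lower()
--     best = 3
--     for i in range(len(s)):
--         for kw, cat in _RULES:
--             if cat < best and s.startswith(kw, i):
--                 best = cat
--     return _QUESTIONS[best]
-- ===== Notes on version B (the rewrite author's own statement) =====
-- stated objective: alternative
-- what changed: Replaces A's priority chain of whole-string substring tests with a single left-to-right scan of the lowered string that checks which rule keyword starts at each position and keeps the minimum (highest-priority) matching rule index, then returns the question at that index.
import Mathlib
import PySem

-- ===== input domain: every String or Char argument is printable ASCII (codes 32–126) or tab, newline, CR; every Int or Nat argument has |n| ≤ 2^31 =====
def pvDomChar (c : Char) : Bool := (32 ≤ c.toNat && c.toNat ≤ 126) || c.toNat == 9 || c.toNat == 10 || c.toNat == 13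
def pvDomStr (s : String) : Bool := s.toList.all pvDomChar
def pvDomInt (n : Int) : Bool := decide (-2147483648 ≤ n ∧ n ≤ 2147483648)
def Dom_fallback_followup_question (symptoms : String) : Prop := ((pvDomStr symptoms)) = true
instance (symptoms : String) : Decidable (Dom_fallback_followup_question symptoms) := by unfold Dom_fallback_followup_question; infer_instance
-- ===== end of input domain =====

-- B replaces A's chain of whole-string substring tests by a single left-to-right scan of
-- the lowered string that keeps the minimum matching rule index (objective: alternative).

-- ===== PORT A =====
def fallback_followup_question (symptoms : String) : String :=
  let s := PySem.Str.lower symptoms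
  if (["chest", "pressure", "tightness", "crushing"].any fun k => PySem.Str.isIn k s) then
    "Is the chest pain severe, sudden, or radiating to the arm/jaw?"
  else if (["breath", "breathing", "shortness of breath", "cant breathe"].any fun k => PySem.Str.isIn k s) then
    "Are you finding it difficult to breathe even at rest?"
  else if PySem.Str.isIn "fever" s then
    "How high is your fever and how long have you had it?"
  else
    "On a scale from mild to severe, how would you rate your main symptom?"

-- ===== PORT B =====
def pvRules : List (List Char × Nat) :=
  [("chest".toList, 0), ("pressure".toList, 0), ("tightness".toList, 0), ("crushing".toList, 0),
   ("breath".toList, 1), ("breathing".toList, 1), ("shortness of breath".toList, 1), ("cant breathe".toList, 1),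
   ("fever".toList, 2)]

def pvQuestions : List String :=
  ["Is the chest pain severe, sudden, or radiating to the arm/jaw?",
   "Are you finding it difficult to breathe even at rest?",
   "How high is your fever and how long have you had it?",
   "On a scale from mild to severe, how would you rate your main symptom?"]

def fallback_followup_question_alt (symptoms : String) : String :=
  let s := (PySem.Str.lower symptoms).toList
  let best := (List.range s.length).foldl
    (fun best i => pvRules.foldl
      (fun b p => if p.2 < b ∧ PySem.Chars.startswith (s.drop i) p.1 then p.2 else b) best) 3
  -- _QUESTIONS[best]: best ≤ 3 always, so the Python index is in range
  pvQuestions.getD best ""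

-- ===== PRECONDITION & SPEC =====
def Spec_fallback_followup_question (symptoms : String) (out : String) : Prop := out = fallback_followup_question_alt symptoms
instance (symptoms : String) (out : String) : Decidable (Spec_fallback_followup_question symptoms out) := by unfold Spec_fallback_followup_question; infer_instance

-- ===== CLAIM (what is proved, stated in full; the proofs are below) =====
def Claim_equal_fallback_followup_question : Prop := ∀ (symptoms : String), Dom_fallback_followup_question symptoms → Spec_fallback_followup_question symptoms (fallback_followup_question symptoms)

-- ===== LEMMAS AND PROOFS =====

-- rule category matched at a single position (3 = no rule keyword starts here)
def pvHit (s : List Char) (i : Nat) : Nat :=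
  if PySem.Chars.startswith (s.drop i) "chest".toList ∨ PySem.Chars.startswith (s.drop i) "pressure".toList ∨
     PySem.Chars.startswith (s.drop i) "tightness".toList ∨ PySem.Chars.startswith (s.drop i) "crushing".toList then 0
  else if PySem.Chars.startswith (s.drop i) "breath".toList ∨ PySem.Chars.startswith (s.drop i) "breathing".toList ∨
     PySem.Chars.startswith (s.drop i) "shortness of breath".toList ∨ PySem.Chars.startswith (s.drop i) "cant breathe".toList then 1
  else if PySem.Chars.startswith (s.drop i) "fever".toList then 2
  else 3

-- the inner fold over the concrete rule table is min with pvHit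
theorem grp0 (s : List Char) (i b : Nat) :
    ([("chest".toList, (0:Nat)), ("pressure".toList, 0), ("tightness".toList, 0), ("crushing".toList, 0)]).foldl
      (fun b p => if p.2 < b ∧ PySem.Chars.startswith (s.drop i) p.1 then p.2 else b) b
    = if PySem.Chars.startswith (s.drop i) "chest".toList ∨ PySem.Chars.startswith (s.drop i) "pressure".toList ∨
         PySem.Chars.startswith (s.drop i) "tightness".toList ∨ PySem.Chars.startswith (s.drop i) "crushing".toList then 0 else b := by
  by_cases h1 : PySem.Chars.startswith (s.drop i) "chest".toList = true <;>
  by_cases h2 : PySem.Chars.startswith (s.drop i) "pressure".toList = true <;>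
  by_cases h3 : PySem.Chars.startswith (s.drop i) "tightness".toList = true <;>
  by_cases h4 : PySem.Chars.startswith (s.drop i) "crushing".toList = true <;>
    simp only [List.foldl_cons, List.foldl_nil, h1, h2, h3, h4, eq_self_iff_true, and_true,
      and_false, or_true, true_or, or_false, false_or, if_true, if_false] <;>
    (try split_ifs) <;> first | omega | tauto

theorem grp1 (s : List Char) (i b : Nat) :
    ([("breath".toList, (1:Nat)), ("breathing".toList, 1), ("shortness of breath".toList, 1), ("cant breathe".toList, 1)]).foldl
      (fun b p => if p.2 < b ∧ PySem.Chars.startswith (s.drop i) p.1 then p.2 else b) b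
    = if PySem.Chars.startswith (s.drop i) "breath".toList ∨ PySem.Chars.startswith (s.drop i) "breathing".toList ∨
         PySem.Chars.startswith (s.drop i) "shortness of breath".toList ∨ PySem.Chars.startswith (s.drop i) "cant breathe".toList then min b 1 else b := by
  by_cases h1 : PySem.Chars.startswith (s.drop i) "breath".toList = true <;>
  by_cases h2 : PySem.Chars.startswith (s.drop i) "breathing".toList = true <;>
  by_cases h3 : PySem.Chars.startswith (s.drop i) "shortness of breath".toList = true <;>
  by_cases h4 : PySem.Chars.startswith (s.drop i) "cant breathe".toList = true <;>
    simp only [List.foldl_cons, List.foldl_nil, h1, h2, h3, h4, eq_self_iff_true, and_true,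
      and_false, or_true, true_or, or_false, false_or, if_true, if_false] <;>
    (try split_ifs) <;> first | omega | tauto

theorem grp2 (s : List Char) (i b : Nat) :
    ([("fever".toList, (2:Nat))]).foldl
      (fun b p => if p.2 < b ∧ PySem.Chars.startswith (s.drop i) p.1 then p.2 else b) b
    = if PySem.Chars.startswith (s.drop i) "fever".toList then min b 2 else b := by
  by_cases h1 : PySem.Chars.startswith (s.drop i) "fever".toList = true <;>
    simp only [List.foldl_cons, List.foldl_nil, h1, eq_self_iff_true, and_true,
      and_false, or_true, true_or, or_false, false_or, if_true, if_false] <;>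
    (try split_ifs) <;> first | omega | tauto

theorem step_eq (s : List Char) (b i : Nat) (hb : b ≤ 3) :
    pvRules.foldl (fun b p => if p.2 < b ∧ PySem.Chars.startswith (s.drop i) p.1 then p.2 else b) b
      = min b (pvHit s i) := by
  have hsplit : pvRules
      = [("chest".toList, (0:Nat)), ("pressure".toList, 0), ("tightness".toList, 0), ("crushing".toList, 0)]
        ++ ([("breath".toList, (1:Nat)), ("breathing".toList, 1), ("shortness of breath".toList, 1), ("cant breathe".toList, 1)]
        ++ [("fever".toList, (2:Nat))]) := rfl
  rw [hsplit, List.foldl_append, List.foldl_append, grp0, grp1, grp2]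
  unfold pvHit
  by_cases hA : (PySem.Chars.startswith (s.drop i) "chest".toList ∨ PySem.Chars.startswith (s.drop i) "pressure".toList ∨
      PySem.Chars.startswith (s.drop i) "tightness".toList ∨ PySem.Chars.startswith (s.drop i) "crushing".toList) <;>
  by_cases hB : (PySem.Chars.startswith (s.drop i) "breath".toList ∨ PySem.Chars.startswith (s.drop i) "breathing".toList ∨
      PySem.Chars.startswith (s.drop i) "shortness of breath".toList ∨ PySem.Chars.startswith (s.drop i) "cant breathe".toList) <;>
  by_cases hC : PySem.Chars.startswith (s.drop i) "fever".toList = true <;>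
    simp only [hA, hB, hC, eq_self_iff_true, iff_true, iff_false, and_true, and_false,
      or_true, true_or, or_false, false_or, if_true, if_false] <;>
    (try split_ifs) <;> first | omega | tauto

theorem fold_outer (L : List Char) (l : List Nat) : ∀ b, b ≤ 3 →
    l.foldl (fun best i => pvRules.foldl
        (fun b p => if p.2 < b ∧ PySem.Chars.startswith (L.drop i) p.1 then p.2 else b) best) b
      = l.foldl (fun b i => min b (pvHit L i)) b := by
  induction l with
  | nil => intro b _; rfl
  | cons a t ih =>
    intro b hb
    simp only [List.foldl_cons]
    rw [step_eq L b a hb]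
    exact ih _ (le_trans (min_le_left _ _) hb)

theorem foldMin_le_init (h : Nat → Nat) (l : List Nat) : ∀ b, l.foldl (fun b i => min b (h i)) b ≤ b := by
  induction l with
  | nil => intro b; simp
  | cons a t ih =>
    intro b
    simp only [List.foldl_cons]
    exact le_trans (ih _) (min_le_left _ _)

theorem foldMin_le_hit (h : Nat → Nat) (l : List Nat) :
    ∀ b i, i ∈ l → l.foldl (fun b i => min b (h i)) b ≤ h i := by
  induction l with
  | nil => simp
  | cons a t ih =>
    intro b i hi
    simp only [List.foldl_cons]
    rcases List.mem_cons.mp hi with rfl | hi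
    · exact le_trans (foldMin_le_init h t _) (min_le_right _ _)
    · exact ih _ _ hi

theorem foldMin_mem (h : Nat → Nat) (l : List Nat) :
    ∀ b, l.foldl (fun b i => min b (h i)) b = b ∨ ∃ i ∈ l, l.foldl (fun b i => min b (h i)) b = h i := by
  induction l with
  | nil => intro b; left; rfl
  | cons a t ih =>
    intro b
    simp only [List.foldl_cons]
    rcases ih (min b (h a)) with he | ⟨i, hi, he⟩
    · rcases min_choice b (h a) with hm | hm
      · left; rw [he, hm]
      · right; exact ⟨a, List.mem_cons_self, by rw [he, hm]⟩
    · right; exact ⟨i, List.mem_cons_of_mem _ hi, he⟩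

-- a nonempty keyword occurs as a substring iff it starts at some in-range position
theorem sw_of_infix {kw L : List Char} (h : kw <:+: L) (hk : kw ≠ []) :
    ∃ i, i < L.length ∧ PySem.Chars.startswith (L.drop i) kw = true := by
  obtain ⟨j, hj⟩ := (PySem.Chars.exists_prefix_drop_iff_isIn _ _).mpr ((PySem.Chars.isIn_iff_infix _ _).mpr h)
  refine ⟨j, ?_, (PySem.Chars.startswith_iff _ _).mpr hj⟩
  by_contra hlt
  push_neg at hlt
  rw [List.drop_eq_nil_of_le hlt] at hj
  exact hk (List.prefix_nil.mp hj)

theorem infix_of_sw {kw L : List Char} (h : ∃ i, i < L.length ∧ PySem.Chars.startswith (L.drop i) kw = true) :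
    kw <:+: L := by
  obtain ⟨i, _, hsw⟩ := h
  exact (PySem.Chars.isIn_iff_infix _ _).mp
    ((PySem.Chars.exists_prefix_drop_iff_isIn _ _).mp ⟨i, (PySem.Chars.startswith_iff _ _).mp hsw⟩)

theorem pvHit_le_three (L : List Char) (i : Nat) : pvHit L i ≤ 3 := by
  unfold pvHit; split_ifs <;> omega

theorem pvHit_eq_zero_iff (L : List Char) (i : Nat) :
    pvHit L i = 0 ↔ (PySem.Chars.startswith (L.drop i) "chest".toList ∨ PySem.Chars.startswith (L.drop i) "pressure".toList ∨
      PySem.Chars.startswith (L.drop i) "tightness".toList ∨ PySem.Chars.startswith (L.drop i) "crushing".toList) := by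
  unfold pvHit; split_ifs with h1 h2 h3
  exacts [iff_of_true rfl h1, iff_of_false (by decide) h1, iff_of_false (by decide) h1,
    iff_of_false (by decide) h1]

theorem pvHit_le_one_iff (L : List Char) (i : Nat) :
    pvHit L i ≤ 1 ↔ ((PySem.Chars.startswith (L.drop i) "chest".toList ∨ PySem.Chars.startswith (L.drop i) "pressure".toList ∨
      PySem.Chars.startswith (L.drop i) "tightness".toList ∨ PySem.Chars.startswith (L.drop i) "crushing".toList) ∨
      (PySem.Chars.startswith (L.drop i) "breath".toList ∨ PySem.Chars.startswith (L.drop i) "breathing".toList ∨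
      PySem.Chars.startswith (L.drop i) "shortness of breath".toList ∨ PySem.Chars.startswith (L.drop i) "cant breathe".toList)) := by
  unfold pvHit; split_ifs with h1 h2 h3
  exacts [iff_of_true (by decide) (Or.inl h1), iff_of_true (by decide) (Or.inr h2),
    iff_of_false (by decide) (not_or.mpr ⟨h1, h2⟩), iff_of_false (by decide) (not_or.mpr ⟨h1, h2⟩)]

theorem pvHit_le_two_iff (L : List Char) (i : Nat) :
    pvHit L i ≤ 2 ↔ ((PySem.Chars.startswith (L.drop i) "chest".toList ∨ PySem.Chars.startswith (L.drop i) "pressure".toList ∨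
      PySem.Chars.startswith (L.drop i) "tightness".toList ∨ PySem.Chars.startswith (L.drop i) "crushing".toList) ∨
      (PySem.Chars.startswith (L.drop i) "breath".toList ∨ PySem.Chars.startswith (L.drop i) "breathing".toList ∨
      PySem.Chars.startswith (L.drop i) "shortness of breath".toList ∨ PySem.Chars.startswith (L.drop i) "cant breathe".toList) ∨
      PySem.Chars.startswith (L.drop i) "fever".toList) := by
  unfold pvHit; split_ifs with h1 h2 h3
  exacts [iff_of_true (by decide) (Or.inl h1), iff_of_true (by decide) (Or.inr (Or.inl h2)),
    iff_of_true (by decide) (Or.inr (Or.inr h3)),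
    iff_of_false (by decide) (not_or.mpr ⟨h1, not_or.mpr ⟨h2, h3⟩⟩)]

-- B's scanned minimum equals A's priority-ordered substring tests
theorem best_eq (L : List Char) :
    (List.range L.length).foldl (fun b i => min b (pvHit L i)) 3 =
      if "chest".toList <:+: L ∨ "pressure".toList <:+: L ∨ "tightness".toList <:+: L ∨ "crushing".toList <:+: L then 0
      else if "breath".toList <:+: L ∨ "breathing".toList <:+: L ∨ "shortness of breath".toList <:+: L ∨ "cant breathe".toList <:+: L then 1
      else if "fever".toList <:+: L then 2
      else 3 := by
  have hmem := foldMin_mem (pvHit L) (List.range L.length) 3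
  have hle := foldMin_le_hit (pvHit L) (List.range L.length) 3
  split_ifs with hc0 hc1 hc2
  · -- some rule-0 keyword occurs
    have hex : ∃ i, i < L.length ∧ pvHit L i = 0 := by
      rcases hc0 with h | h | h | h
      · obtain ⟨i, hi, hs⟩ := sw_of_infix h (by simp)
        exact ⟨i, hi, (pvHit_eq_zero_iff L i).mpr (Or.inl hs)⟩
      · obtain ⟨i, hi, hs⟩ := sw_of_infix h (by simp)
        exact ⟨i, hi, (pvHit_eq_zero_iff L i).mpr (Or.inr (Or.inl hs))⟩
      · obtain ⟨i, hi, hs⟩ := sw_of_infix h (by simp)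
        exact ⟨i, hi, (pvHit_eq_zero_iff L i).mpr (Or.inr (Or.inr (Or.inl hs)))⟩
      · obtain ⟨i, hi, hs⟩ := sw_of_infix h (by simp)
        exact ⟨i, hi, (pvHit_eq_zero_iff L i).mpr (Or.inr (Or.inr (Or.inr hs)))⟩
    obtain ⟨i, hi, h0⟩ := hex
    have := hle i (List.mem_range.mpr hi)
    omega
  · -- no rule-0 keyword, some rule-1 keyword
    have hno0 : ∀ i, i < L.length → pvHit L i ≠ 0 := by
      intro i hi h0
      rcases (pvHit_eq_zero_iff L i).mp h0 with h | h | h | h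
      · exact hc0 (Or.inl (infix_of_sw ⟨i, hi, h⟩))
      · exact hc0 (Or.inr (Or.inl (infix_of_sw ⟨i, hi, h⟩)))
      · exact hc0 (Or.inr (Or.inr (Or.inl (infix_of_sw ⟨i, hi, h⟩))))
      · exact hc0 (Or.inr (Or.inr (Or.inr (infix_of_sw ⟨i, hi, h⟩))))
    have hup : ∃ i, i < L.length ∧ pvHit L i ≤ 1 := by
      rcases hc1 with h | h | h | h
      · obtain ⟨i, hi, hs⟩ := sw_of_infix h (by simp)
        exact ⟨i, hi, (pvHit_le_one_iff L i).mpr (Or.inr (Or.inl hs))⟩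
      · obtain ⟨i, hi, hs⟩ := sw_of_infix h (by simp)
        exact ⟨i, hi, (pvHit_le_one_iff L i).mpr (Or.inr (Or.inr (Or.inl hs)))⟩
      · obtain ⟨i, hi, hs⟩ := sw_of_infix h (by simp)
        exact ⟨i, hi, (pvHit_le_one_iff L i).mpr (Or.inr (Or.inr (Or.inr (Or.inl hs))))⟩
      · obtain ⟨i, hi, hs⟩ := sw_of_infix h (by simp)
        exact ⟨i, hi, (pvHit_le_one_iff L i).mpr (Or.inr (Or.inr (Or.inr (Or.inr hs))))⟩
    obtain ⟨i, hi, h1⟩ := hup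
    have hub := hle i (List.mem_range.mpr hi)
    rcases hmem with he | ⟨j, hj, he⟩
    · omega
    · have hj' := List.mem_range.mp hj
      have := hno0 j hj'
      omega
  · -- only "fever" occurs
    have hno1 : ∀ i, i < L.length → ¬ pvHit L i ≤ 1 := by
      intro i hi hle1
      rcases (pvHit_le_one_iff L i).mp hle1 with h | h
      · rcases h with h | h | h | h
        · exact hc0 (Or.inl (infix_of_sw ⟨i, hi, h⟩))
        · exact hc0 (Or.inr (Or.inl (infix_of_sw ⟨i, hi, h⟩)))
        · exact hc0 (Or.inr (Or.inr (Or.inl (infix_of_sw ⟨i, hi, h⟩))))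
        · exact hc0 (Or.inr (Or.inr (Or.inr (infix_of_sw ⟨i, hi, h⟩))))
      · rcases h with h | h | h | h
        · exact hc1 (Or.inl (infix_of_sw ⟨i, hi, h⟩))
        · exact hc1 (Or.inr (Or.inl (infix_of_sw ⟨i, hi, h⟩)))
        · exact hc1 (Or.inr (Or.inr (Or.inl (infix_of_sw ⟨i, hi, h⟩))))
        · exact hc1 (Or.inr (Or.inr (Or.inr (infix_of_sw ⟨i, hi, h⟩))))
    obtain ⟨i, hi, hs⟩ := sw_of_infix hc2 (by simp)
    have h2 : pvHit L i ≤ 2 := (pvHit_le_two_iff L i).mpr (Or.inr (Or.inr hs))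
    have hub := hle i (List.mem_range.mpr hi)
    rcases hmem with he | ⟨j, hj, he⟩
    · omega
    · have hj' := List.mem_range.mp hj
      have := hno1 j hj'
      omega
  · -- no keyword occurs at all
    rcases hmem with he | ⟨j, hj, he⟩
    · exact he
    · have hj' := List.mem_range.mp hj
      have h3 : pvHit L j = 3 := by
        have hle3 := pvHit_le_three L j
        by_contra hne
        have h2 : pvHit L j ≤ 2 := by omega
        rcases (pvHit_le_two_iff L j).mp h2 with h | h | h
        · rcases h with h | h | h | h
          · exact hc0 (Or.inl (infix_of_sw ⟨j, hj', h⟩))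
          · exact hc0 (Or.inr (Or.inl (infix_of_sw ⟨j, hj', h⟩)))
          · exact hc0 (Or.inr (Or.inr (Or.inl (infix_of_sw ⟨j, hj', h⟩))))
          · exact hc0 (Or.inr (Or.inr (Or.inr (infix_of_sw ⟨j, hj', h⟩))))
        · rcases h with h | h | h | h
          · exact hc1 (Or.inl (infix_of_sw ⟨j, hj', h⟩))
          · exact hc1 (Or.inr (Or.inl (infix_of_sw ⟨j, hj', h⟩)))
          · exact hc1 (Or.inr (Or.inr (Or.inl (infix_of_sw ⟨j, hj', h⟩))))
          · exact hc1 (Or.inr (Or.inr (Or.inr (infix_of_sw ⟨j, hj', h⟩))))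
        · exact hc2 (infix_of_sw ⟨j, hj', h⟩)
      rw [he, h3]

-- ===== VERDICT (by name: the statement is the Claim_ definition above) =====
theorem fallback_followup_question_spec : Claim_equal_fallback_followup_question := by
  intro symptoms _
  simp only [Spec_fallback_followup_question, fallback_followup_question,
    fallback_followup_question_alt]
  rw [fold_outer _ _ 3 (by omega), best_eq]
  simp only [List.any_cons, List.any_nil, Bool.or_false, Bool.or_eq_true,
    PySem.Str.isIn_iff_infix]
  split_ifs <;> simp_all [pvQuestions]
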